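-- pv_equiv track=rewrite | github.com/yuki22683/program-shooting | scripts/fix_json_errors.py | fix_inline_newlines
-- ===== SOURCE A (Python) =====
-- def fix_inline_newlines(content):
--     """Fix actual newline/tab characters inside JSON strings."""
--     result = []
--     in_string = False
--     i = 0
--
--     while i < len(content):
--         char = content[i]
--
--         # Track string boundaries
--         if char == '"':
--             # Check if escaped
--             num_backslashes = 0
--             j = i - 1
--             while j >= 0 and content[j] == '\\':
--                 num_backslashes += 1
--                 j -= 1
--
--             if num_backslashes % 2 == 0:
--                 # Not escaped, toggle string state
--                 in_string = not in_string
--             result.append(char)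
--         elif in_string:
--             if char == '\n':
--                 result.append('\\n')
--             elif char == '\r':
--                 pass  # Skip CR
--             elif char == '\t':
--                 result.append('\\t')
--             elif ord(char) < 32:
--                 # Other control characters - escape as unicode
--                 result.append(f'\\u{ord(char):04x}')
--             else:
--                 result.append(char)
--         else:
--             result.append(char)
--
--         i += 1
--
--     return ''.join(result)
-- ===== SOURCE B (Python) =====
-- def fix_inline_newlines(content):
--     """Fix actual newline/tab characters inside JSON strings.
--
--     Single pass: the number of consecutive backslashes immediately before
--     the current character is maintained incrementally, so no backward
--     rescan is needed at each quote.
--     """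
--     out = []
--     in_string = False
--     bs = 0  # consecutive backslashes immediately before the current char
--     for ch in content:
--         if ch == '"':
--             if bs % 2 == 0:
--                 in_string = not in_string
--             out.append(ch)
--         elif in_string:
--             if ch == '\n':
--                 out.append('\\n')
--             elif ch == '\r':
--                 pass
--             elif ch == '\t':
--                 out.append('\\t')
--             elif ord(ch) < 32:
--                 out.append(f'\\u{ord(ch):04x}')
--             else:
--                 out.append(ch)
--         else:
--             out.append(ch)
--         bs = bs + 1 if ch == '\\' else 0
--     return ''.join(out)
-- ===== Notes on version B (the rewrite author's own statement) =====
-- stated objective: faster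
-- what changed: B keeps a running count of consecutive backslashes before the current character instead of rescanning backward from every quote, turning the quadratic worst case into one linear pass.
import Mathlib
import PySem

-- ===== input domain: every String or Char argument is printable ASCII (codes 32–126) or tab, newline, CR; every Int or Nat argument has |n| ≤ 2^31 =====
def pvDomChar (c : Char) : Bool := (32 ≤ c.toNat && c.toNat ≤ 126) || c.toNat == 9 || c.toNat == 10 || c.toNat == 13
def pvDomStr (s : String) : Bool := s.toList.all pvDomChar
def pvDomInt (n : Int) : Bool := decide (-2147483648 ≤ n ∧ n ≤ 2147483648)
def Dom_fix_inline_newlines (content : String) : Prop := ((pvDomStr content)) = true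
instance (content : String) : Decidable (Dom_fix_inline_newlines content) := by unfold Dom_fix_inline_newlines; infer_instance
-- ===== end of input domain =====

-- B replaces A's per-quote backward rescan by an incrementally maintained
-- count of consecutive backslashes (objective: faster, one linear pass).

-- ===== PORT A =====

-- hex digit of n < 16, as in Python's '{:04x}' (lowercase)
def pvHexDigitA (n : Nat) : Char :=
  if n < 10 then Char.ofNat (48 + n) else Char.ofNat (87 + n)

-- the inner 'while j >= 0 and content[j] == "\\"' scan, j counting down from i-1
def pvBsCountA (cs : List Char) (j : Nat) : Nat :=
  match cs[j]? with
  | some ch =>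
      if ch = '\\' then
        match j with
        | 0 => 1
        | j' + 1 => 1 + pvBsCountA cs j'
      else 0
  | none => 0

-- escape of one in-string character (A's elif chain)
def pvEscA (ch : Char) : List Char :=
  if ch = '\n' then ['\\', 'n']
  else if ch = '\r' then []
  else if ch = '\t' then ['\\', 't']
  else if ch.toNat < 32 then
    ['\\', 'u', '0', '0', pvHexDigitA (ch.toNat / 16), pvHexDigitA (ch.toNat % 16)]
  else [ch]

-- A's 'while i < len(content)' loop with index i and accumulator
def pvLoopA (cs : List Char) (i : Nat) (inStr : Bool) (acc : List Char) : List Char :=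
  if h : i < cs.length then
    let ch := cs[i]
    if ch = '"' then
      let nb := if i = 0 then 0 else pvBsCountA cs (i - 1)
      pvLoopA cs (i + 1) (if nb % 2 = 0 then !inStr else inStr) (acc ++ [ch])
    else if inStr then
      pvLoopA cs (i + 1) inStr (acc ++ pvEscA ch)
    else
      pvLoopA cs (i + 1) inStr (acc ++ [ch])
  else acc
  termination_by cs.length - i

def fix_inline_newlines (content : String) : String :=
  String.mk (pvLoopA content.toList 0 false [])

-- ===== PORT B =====

def pvHexDigitB (n : Nat) : Char :=
  if n < 10 then Char.ofNat (48 + n) else Char.ofNat (87 + n)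

def pvEscB (ch : Char) : List Char :=
  if ch = '\n' then ['\\', 'n']
  else if ch = '\r' then []
  else if ch = '\t' then ['\\', 't']
  else if ch.toNat < 32 then
    ['\\', 'u', '0', '0', pvHexDigitB (ch.toNat / 16), pvHexDigitB (ch.toNat % 16)]
  else [ch]

-- one step of B's single pass: state = (in_string, running backslash count, output)
def pvStepB (st : Bool × Nat × List Char) (ch : Char) : Bool × Nat × List Char :=
  let p :=
    if ch = '"' then ((if st.2.1 % 2 = 0 then !st.1 else st.1), st.2.2 ++ [ch])
    else if st.1 then (st.1, st.2.2 ++ pvEscB ch)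
    else (st.1, st.2.2 ++ [ch])
  (p.1, (if ch = '\\' then st.2.1 + 1 else 0), p.2)

def fix_inline_newlines_alt (content : String) : String :=
  String.mk (content.toList.foldl pvStepB (false, 0, [])).2.2

-- ===== PRECONDITION & SPEC =====
def Spec_fix_inline_newlines (content : String) (out : String) : Prop := out = fix_inline_newlines_alt content
instance (content : String) (out : String) : Decidable (Spec_fix_inline_newlines content out) := by unfold Spec_fix_inline_newlines; infer_instance

-- ===== CLAIM (what is proved, stated in full; the proofs are below) =====
def Claim_equal_fix_inline_newlines : Prop := ∀ (content : String), Dom_fix_inline_newlines content → Spec_fix_inline_newlines content (fix_inline_newlines content)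

-- ===== LEMMAS AND PROOFS =====

-- trailing-backslash count of a list (what B's counter tracks)
def pvTB (l : List Char) : Nat := (l.reverse.takeWhile (· = '\\')).length

theorem pvTB_append (l : List Char) (ch : Char) :
    pvTB (l ++ [ch]) = if ch = '\\' then pvTB l + 1 else 0 := by
  simp [pvTB, List.takeWhile]
  split_ifs with h <;> simp [h]

theorem pvBsCountA_eq (cs : List Char) (j : Nat) (hj : j < cs.length) :
    pvBsCountA cs j = pvTB (cs.take (j + 1)) := by
  induction j with
  | zero =>
      have : cs[0]? = some cs[0] := List.getElem?_eq_getElem hj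
      rw [pvBsCountA, this]
      have ht : cs.take 1 = [cs[0]] := by
        cases cs with
        | nil => simp at hj
        | cons a l => simp
      rw [ht]
      by_cases h : cs[0] = '\\' <;> simp [h, pvTB, List.takeWhile]
  | succ j' ih =>
      have hj' : j' < cs.length := Nat.lt_of_succ_lt hj
      have hget : cs[j' + 1]? = some cs[j' + 1] := List.getElem?_eq_getElem hj
      rw [pvBsCountA, hget]
      have ht : cs.take (j' + 2) = cs.take (j' + 1) ++ [cs[j' + 1]] :=
        List.take_succ_eq_append_getElem (by omega)
      rw [ht, pvTB_append]
      by_cases h : cs[j' + 1] = '\\' <;> simp [h, ih hj', Nat.add_comm]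

-- A's indexed loop equals B's fold started at position i with the right counter
theorem pvLoopA_eq_foldl (cs : List Char) (i : Nat) (inStr : Bool) (acc : List Char) :
    pvLoopA cs i inStr acc =
      ((cs.drop i).foldl pvStepB (inStr, pvTB (cs.take i), acc)).2.2 := by
  induction h : cs.length - i generalizing i inStr acc with
  | zero =>
      have hge : cs.length ≤ i := by omega
      rw [pvLoopA.eq_def]
      simp [Nat.not_lt_of_ge hge, List.drop_eq_nil_of_le hge]
  | succ n ih =>
      have hi : i < cs.length := by omega
      have hdrop : cs.drop i = cs[i] :: cs.drop (i + 1) := List.drop_eq_getElem_cons hi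
      have htake : cs.take (i + 1) = cs.take i ++ [cs[i]] :=
        List.take_succ_eq_append_getElem hi
      have hih := fun inStr acc => ih (i + 1) inStr acc (by omega)
      rw [pvLoopA.eq_def]
      simp only [hi, dif_pos]
      have hbs : (if cs[i] = '\\' then pvTB (cs.take i) + 1 else 0) = pvTB (cs.take (i + 1)) := by
        rw [htake, pvTB_append]
      by_cases hq : cs[i] = '"'
      · have hnb : (if i = 0 then 0 else pvBsCountA cs (i - 1)) = pvTB (cs.take i) := by
          by_cases h0 : i = 0
          · simp [h0, pvTB]
          · rw [if_neg h0]
            have := pvBsCountA_eq cs (i - 1) (by omega)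
            rwa [Nat.sub_add_cancel (by omega)] at this
        have hz : pvTB (cs.take (i + 1)) = 0 := by
          rw [htake, pvTB_append, if_neg (by rw [hq]; decide)]
        rw [hdrop]
        simp only [List.foldl_cons]
        rw [hih, hz, hnb]
        simp [pvStepB, hq]
      · rw [hdrop]
        simp only [List.foldl_cons]
        by_cases hs : inStr = true
        · rw [if_neg hq, if_pos hs, hih]
          simp [pvStepB, hq, hs, hbs, pvEscA, pvEscB, pvHexDigitA, pvHexDigitB]
        · rw [if_neg hq, if_neg hs, hih]
          simp [pvStepB, hq, hs, hbs]

-- ===== VERDICT (by name: the statement is the Claim_ definition above) =====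
theorem fix_inline_newlines_spec : Claim_equal_fix_inline_newlines := by
  intro content _
  unfold Spec_fix_inline_newlines fix_inline_newlines fix_inline_newlines_alt
  rw [pvLoopA_eq_foldl]
  simp [pvTB]
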